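-- pv_equiv track=rewrite | github.com/hvemerjeg/hvemerjeg | Python/Well-known_algorithms/validate_subsequence.py | valid_subsequence
-- ===== SOURCE A (Python) =====
-- def valid_subsequence(tupla: tuple, sequence: tuple):#I decided to use tuples instead of list
-- #since we are not manipulating the elements.
--     indx = 0
--     indx1 = 0
--     while indx < len(tupla) and indx1 < len(sequence):
--         if sequence[indx1] == tupla[indx]:
--             indx1 += 1
--         indx += 1#So, we iterate through the tuple an check if an element is equal to the first element of
-- #the sequence. If they are equal, we need to compare the second element of the sequence, so in this case
-- #indx1 += 1.
--     return indx1 == len(sequence)#If indx1 equals the length of the sequence means that not only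
-- ===== SOURCE B (Python) =====
-- def valid_subsequence(tupla: tuple, sequence: tuple):
--     # Index every value's occurrence positions once, then answer each sequence
--     # element by binary-searching the first occurrence past the previous match.
--     pos = {}
--     for i, x in enumerate(tupla):
--         pos.setdefault(x, []).append(i)
--     cur = 0
--     for c in sequence:
--         lst = pos.get(c, [])
--         lo, hi = 0, len(lst)
--         while lo < hi:
--             mid = (lo + hi) // 2
--             if lst[mid] < cur:
--                 lo = mid + 1
--             else:
--                 hi = mid
--         if lo == len(lst):
--             return False
--         cur = lst[lo] + 1
--     return True
-- ===== Notes on version B (the rewrite author's own statement) =====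
-- stated objective: alternative
-- what changed: Replaces A's single two-pointer scan by a two-stage algorithm: one pass builds a dictionary mapping each value to its sorted occurrence positions, then each sequence element is resolved by a hand-written binary search for the first occurrence past the previous match.
import Mathlib
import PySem

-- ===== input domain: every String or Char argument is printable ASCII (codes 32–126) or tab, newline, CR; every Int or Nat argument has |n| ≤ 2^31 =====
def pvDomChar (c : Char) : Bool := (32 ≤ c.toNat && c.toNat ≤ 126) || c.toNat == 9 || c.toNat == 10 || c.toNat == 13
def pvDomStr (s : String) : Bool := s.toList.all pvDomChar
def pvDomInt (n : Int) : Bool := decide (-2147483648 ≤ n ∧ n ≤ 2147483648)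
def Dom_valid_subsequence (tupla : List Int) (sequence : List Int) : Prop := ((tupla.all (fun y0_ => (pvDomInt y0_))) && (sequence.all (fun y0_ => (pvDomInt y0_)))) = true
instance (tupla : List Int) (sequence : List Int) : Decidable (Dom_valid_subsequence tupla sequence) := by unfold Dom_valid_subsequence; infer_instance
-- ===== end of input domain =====

-- B replaces A's two-pointer scan by an occurrence-position index plus binary search (objective: alternative, same result proved equal).

-- ===== PORT A =====
-- the while loop: state (indx, indx1), returns the final indx1
def validSubseqLoopA (tupla : List Int) (sequence : List Int) (indx indx1 : Nat) : Nat :=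
  if indx < tupla.length ∧ indx1 < sequence.length then
    validSubseqLoopA tupla sequence (indx + 1)
      (if sequence.getD indx1 0 == tupla.getD indx 0 then indx1 + 1 else indx1)
  else indx1
termination_by tupla.length - indx

def valid_subsequence (tupla : List Int) (sequence : List Int) : Bool :=
  validSubseqLoopA tupla sequence 0 0 == sequence.length

-- ===== PORT B =====
-- first pass: pos = {}; for i, x in enumerate(tupla): pos.setdefault(x, []).append(i)
def buildPos (tupla : List Int) : PySem.Dict Int (List Int) :=
  (PySem.List.enumerate tupla).foldl
    (fun pos p => pos.insert p.2 (pos.getD p.2 [] ++ [p.1])) PySem.Dict.empty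

-- the hand-written binary search: while lo < hi: mid = (lo+hi)//2; ...
def bsearchLow (lst : List Int) (cur : Int) (lo hi : Nat) : Nat :=
  if lo < hi then
    if lst.getD ((lo + hi) / 2) 0 < cur then bsearchLow lst cur ((lo + hi) / 2 + 1) hi
    else bsearchLow lst cur lo ((lo + hi) / 2)
  else lo
termination_by hi - lo
decreasing_by all_goals omega

-- second pass: for c in sequence: ... with early return False
def loopB (pos : PySem.Dict Int (List Int)) : List Int → Int → Bool
  | [], _ => true
  | c :: cs, cur =>
    let lst := pos.getD c []
    let lo := bsearchLow lst cur 0 lst.length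
    if lo == lst.length then false
    else loopB pos cs (lst.getD lo 0 + 1)

def valid_subsequence_alt (tupla : List Int) (sequence : List Int) : Bool :=
  loopB (buildPos tupla) sequence 0

-- ===== PRECONDITION & SPEC =====
def Spec_valid_subsequence (tupla : List Int) (sequence : List Int) (out : Bool) : Prop := out = valid_subsequence_alt tupla sequence
instance (tupla : List Int) (sequence : List Int) (out : Bool) : Decidable (Spec_valid_subsequence tupla sequence out) := by unfold Spec_valid_subsequence; infer_instance

-- ===== CLAIM (what is proved, stated in full; the proofs are below) =====
def Claim_equal_valid_subsequence : Prop := ∀ (tupla : List Int) (sequence : List Int), Dom_valid_subsequence tupla sequence → Spec_valid_subsequence tupla sequence (valid_subsequence tupla sequence)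

-- ===== LEMMAS AND PROOFS =====

-- proof-only middleman: the head-to-head structural recursion
def subseqRec : List Int → List Int → Bool
  | _, [] => true
  | [], _ :: _ => false
  | t :: ts, s :: ss => if s == t then subseqRec ts ss else subseqRec ts (s :: ss)

-- A-side loop invariant
theorem validSubseqLoopA_eq (tupla sequence : List Int) (indx indx1 : Nat)
    (h1 : indx1 ≤ sequence.length) :
    ((validSubseqLoopA tupla sequence indx indx1 == sequence.length) : Bool)
      = subseqRec (tupla.drop indx) (sequence.drop indx1) := by
  induction' hn : tupla.length - indx using Nat.strong_induction_on with n ih generalizing indx indx1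
  rw [validSubseqLoopA]
  by_cases hi : indx < tupla.length ∧ indx1 < sequence.length
  · rw [if_pos hi]
    obtain ⟨hit, his⟩ := hi
    rw [List.drop_eq_getElem_cons hit, List.drop_eq_getElem_cons his]
    rw [List.getD_eq_getElem sequence 0 his, List.getD_eq_getElem tupla 0 hit]
    by_cases he : sequence[indx1] = tupla[indx]
    · rw [if_pos (by simpa using he)]
      rw [subseqRec]
      rw [if_pos (by simpa using he)]
      rw [ih (tupla.length - (indx + 1)) (by omega) (indx + 1) (indx1 + 1) his rfl]
    · rw [if_neg (by simpa using he)]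
      rw [subseqRec]
      rw [if_neg (by simpa using he)]
      rw [ih (tupla.length - (indx + 1)) (by omega) (indx + 1) indx1 h1 rfl]
      rw [← List.drop_eq_getElem_cons his]
  · simp only [if_neg hi]
    rcases Nat.lt_or_ge indx1 sequence.length with hs | hs
    · have hit : tupla.length ≤ indx := by omega
      rw [List.drop_eq_nil_of_le hit, List.drop_eq_getElem_cons hs]
      rw [subseqRec]
      simp; omega
    · have : indx1 = sequence.length := by omega
      subst this
      rw [List.drop_eq_nil_of_le (le_refl _)]
      cases tupla.drop indx <;> simp [subseqRec]

-- proof-only spec of buildPos: the occurrence positions of c in t, indices from base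
def occFrom : List Int → Int → Int → List Int
  | [], _, _ => []
  | x :: xs, base, c => if x = c then base :: occFrom xs (base + 1) c else occFrom xs (base + 1) c

theorem foldPos_getD (l : List Int) (base : Int) (d : PySem.Dict Int (List Int)) (c : Int) :
    (((PySem.List.enumerate l base).foldl
        (fun pos p => pos.insert p.2 (pos.getD p.2 [] ++ [p.1])) d).getD c [])
      = d.getD c [] ++ occFrom l base c := by
  induction l generalizing base d with
  | nil => simp [PySem.List.enumerate_nil, occFrom]
  | cons x xs ih =>
    rw [PySem.List.enumerate_cons, List.foldl_cons, ih, occFrom]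
    by_cases h : x = c
    · subst h
      rw [if_pos rfl, PySem.Dict.getD_insert_self, List.append_assoc]
      rfl
    · rw [if_neg h, PySem.Dict.getD_insert_of_ne _ _ _ (Ne.symm h)]

theorem buildPos_getD (t : List Int) (c : Int) :
    (buildPos t).getD c [] = occFrom t 0 c := by
  rw [buildPos, foldPos_getD]
  simp [PySem.Dict.getD, PySem.Dict.empty, PySem.Dict.get?]

-- occFrom facts
theorem occFrom_bounds (t : List Int) (base c j : Int) (h : j ∈ occFrom t base c) :
    base ≤ j ∧ j < base + t.length := by
  induction t generalizing base with
  | nil => simp [occFrom] at h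
  | cons x xs ih =>
    simp only [occFrom] at h
    split_ifs at h with hx
    · rcases List.mem_cons.mp h with h | h
      · subst h; simp
      · have := ih (base + 1) h; simp at *; omega
    · have := ih (base + 1) h; simp at *; omega

theorem occFrom_pairwise (t : List Int) (base c : Int) :
    (occFrom t base c).Pairwise (· < ·) := by
  induction t generalizing base with
  | nil => simp [occFrom]
  | cons x xs ih =>
    simp only [occFrom]
    split_ifs with hx
    · exact List.Pairwise.cons (fun j hj => by have := occFrom_bounds xs (base + 1) c j hj; omega) (ih (base + 1))
    · exact ih (base + 1)

theorem occFrom_mem_iff (t : List Int) (base c j : Int) :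
    j ∈ occFrom t base c ↔ ∃ k : Nat, k < t.length ∧ j = base + k ∧ t.getD k 0 = c := by
  induction t generalizing base with
  | nil => simp [occFrom]
  | cons x xs ih =>
    simp only [occFrom]
    constructor
    · intro h
      split_ifs at h with hx
      · rcases List.mem_cons.mp h with h | h
        · exact ⟨0, by simp, by omega, by simpa using hx⟩
        · obtain ⟨k, hk, hj, hg⟩ := (ih (base + 1)).mp h
          exact ⟨k + 1, by simp only [List.length_cons]; omega, by push_cast; omega, by simpa using hg⟩
      · obtain ⟨k, hk, hj, hg⟩ := (ih (base + 1)).mp h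
        exact ⟨k + 1, by simp only [List.length_cons]; omega, by push_cast; omega, by simpa using hg⟩
    · rintro ⟨k, hk, hj, hg⟩
      cases k with
      | zero =>
        simp only [List.getD_cons_zero] at hg
        rw [if_pos hg]
        have : j = base := by omega
        simp [this]
      | succ k =>
        have hmem : j ∈ occFrom xs (base + 1) c :=
          (ih (base + 1)).mpr ⟨k, by simp only [List.length_cons] at hk; omega, by push_cast [Nat.cast_succ] at hj ⊢; omega, by simpa using hg⟩
        split_ifs <;> simp [hmem]

-- binary search: on a strictly increasing list, result r brackets cur
theorem bsearchLow_spec (lst : List Int) (cur : Int) (lo hi : Nat)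
    (hmono : ∀ k1 k2 : Nat, k1 < k2 → k2 < lst.length → lst.getD k1 0 < lst.getD k2 0)
    (hhi : hi ≤ lst.length) (hlohi : lo ≤ hi)
    (hlo : ∀ k, k < lo → lst.getD k 0 < cur)
    (hhi2 : ∀ k, hi ≤ k → k < lst.length → ¬ lst.getD k 0 < cur) :
    bsearchLow lst cur lo hi ≤ lst.length ∧
      (∀ k, k < bsearchLow lst cur lo hi → lst.getD k 0 < cur) ∧
      (bsearchLow lst cur lo hi < lst.length → ¬ lst.getD (bsearchLow lst cur lo hi) 0 < cur) := by
  induction' hn : hi - lo using Nat.strong_induction_on with n ih generalizing lo hi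
  rw [bsearchLow]
  by_cases h : lo < hi
  · rw [if_pos h]
    by_cases hm : lst.getD ((lo + hi) / 2) 0 < cur
    · rw [if_pos hm]
      refine ih (hi - ((lo + hi) / 2 + 1)) (by omega) ((lo + hi) / 2 + 1) hi hhi (by omega) (fun k hk => ?_) hhi2 rfl
      rcases Nat.lt_or_ge k ((lo + hi) / 2) with h1 | h1
      · exact lt_trans (hmono k ((lo + hi) / 2) h1 (by omega)) hm
      · have : k = (lo + hi) / 2 := by omega
        rw [this]; exact hm
    · rw [if_neg hm]
      refine ih ((lo + hi) / 2 - lo) (by omega) lo ((lo + hi) / 2) (by omega) (by omega) hlo (fun k hk1 hk2 => ?_) rfl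
      rcases Nat.lt_or_ge k hi with h1 | h1
      · rcases Nat.eq_or_lt_of_le hk1 with h2 | h2
        · rw [← h2]; exact hm
        · intro hlt
          exact hm (lt_trans (hmono ((lo + hi) / 2) k h2 hk2) hlt)
      · exact hhi2 k h1 hk2
  · rw [if_neg h]
    exact ⟨by omega, hlo, fun hr => hhi2 lo (by omega) hr⟩

-- greedy step lemmas for subseqRec
theorem subseqRec_none (t : List Int) (c : Int) (cs : List Int) (cur : Nat)
    (h : ∀ m : Nat, cur ≤ m → m < t.length → t.getD m 0 ≠ c) :
    subseqRec (t.drop cur) (c :: cs) = false := by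
  induction' hn : t.length - cur using Nat.strong_induction_on with n ih generalizing cur
  rcases Nat.lt_or_ge cur t.length with hc | hc
  · rw [List.drop_eq_getElem_cons hc, subseqRec]
    rw [if_neg (by simpa using Ne.symm (by
      have := h cur (le_refl _) hc
      rw [List.getD_eq_getElem t 0 hc] at this
      exact this))]
    exact ih (t.length - (cur + 1)) (by omega) (cur + 1) (fun m hm => h m (by omega)) rfl
  · rw [List.drop_eq_nil_of_le hc, subseqRec]

theorem subseqRec_step (t : List Int) (c : Int) (cs : List Int) (cur j : Nat)
    (hcj : cur ≤ j) (hj : j < t.length) (hg : t.getD j 0 = c)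
    (hmin : ∀ m : Nat, cur ≤ m → m < j → t.getD m 0 ≠ c) :
    subseqRec (t.drop cur) (c :: cs) = subseqRec (t.drop (j + 1)) cs := by
  induction' hn : j - cur using Nat.strong_induction_on with n ih generalizing cur
  have hc : cur < t.length := by omega
  rw [List.drop_eq_getElem_cons hc, subseqRec]
  rcases Nat.eq_or_lt_of_le hcj with he | hlt
  · subst he
    rw [if_pos (by rw [List.getD_eq_getElem t 0 hc] at hg; simpa using hg.symm)]
  · rw [if_neg (by simpa using Ne.symm (by
      have := hmin cur (le_refl _) hlt
      rw [List.getD_eq_getElem t 0 hc] at this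
      exact this))]
    exact ih (j - (cur + 1)) (by omega) (cur + 1) (by omega) (fun m hm => hmin m (by omega)) rfl

-- occFrom is strictly monotone position-wise
theorem occFrom_mono (t : List Int) (c : Int) :
    ∀ k1 k2 : Nat, k1 < k2 → k2 < (occFrom t 0 c).length →
      (occFrom t 0 c).getD k1 0 < (occFrom t 0 c).getD k2 0 := by
  intro k1 k2 h12 h2
  have hpw := occFrom_pairwise t 0 c
  have := (List.pairwise_iff_getElem.mp hpw) k1 k2 (by omega) h2 h12
  rw [List.getD_eq_getElem _ 0 (by omega : k1 < (occFrom t 0 c).length),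
      List.getD_eq_getElem _ 0 h2]
  exact this

-- B's loop computes the head-to-head recursion from position cur
theorem loopB_eq (t : List Int) (cs : List Int) (cur : Nat) :
    loopB (buildPos t) cs (cur : Int) = subseqRec (t.drop cur) cs := by
  induction cs generalizing cur with
  | nil => simp [loopB, subseqRec]
  | cons c cs ih =>
    rw [loopB]
    simp only [buildPos_getD]
    set lst := occFrom t 0 c with hlst
    obtain ⟨hr1, hr2, hr3⟩ := bsearchLow_spec lst (cur : Int) 0 lst.length
      (hlst ▸ occFrom_mono t c) (le_refl _) (Nat.zero_le _) (by omega) (fun k hk1 hk2 => by omega)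
    set r := bsearchLow lst (cur : Int) 0 lst.length with hr
    by_cases hre : r = lst.length
    · rw [if_pos (by simpa using hre)]
      refine (subseqRec_none t c cs cur (fun m hm1 hm2 hg => ?_)).symm
      have hmem : ((m : Int)) ∈ lst := by
        rw [hlst, occFrom_mem_iff]
        exact ⟨m, hm2, by omega, hg⟩
      obtain ⟨k, hk, hkv⟩ := List.mem_iff_getElem.mp hmem
      have h2 := hr2 k (by omega)
      rw [List.getD_eq_getElem lst 0 hk, hkv] at h2
      omega
    · rw [if_neg (by simpa using hre)]
      have hrlen : r < lst.length := by omega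
      have hjmem : lst.getD r 0 ∈ lst := by
        rw [List.getD_eq_getElem lst 0 hrlen]
        exact List.getElem_mem hrlen
      obtain ⟨kj, hkj1, hkj2, hkj3⟩ := (occFrom_mem_iff t 0 c (lst.getD r 0)).mp (hlst ▸ hjmem)
      have hcurj : (cur : Int) ≤ lst.getD r 0 := by
        have := hr3 hrlen; omega
      -- minimality: no occurrence of c in [cur, kj)
      have hmin : ∀ m : Nat, cur ≤ m → m < kj → t.getD m 0 ≠ c := by
        intro m hm1 hm2 hg
        have hmem : ((m : Int)) ∈ lst := by
          rw [hlst, occFrom_mem_iff]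
          exact ⟨m, by omega, by omega, hg⟩
        obtain ⟨k, hk, hkv⟩ := List.mem_iff_getElem.mp hmem
        have hgdk : lst.getD k 0 = (m : Int) := by
          rw [List.getD_eq_getElem lst 0 hk, hkv]
        rcases Nat.lt_or_ge k r with h1 | h1
        · have := hr2 k h1; omega
        · rcases Nat.eq_or_lt_of_le h1 with h2 | h2
          · rw [h2, hgdk] at hkj2; omega
          · have := (hlst ▸ occFrom_mono t c) r k h2 hk
            omega
      have hstep := subseqRec_step t c cs cur kj (by omega) hkj1 hkj3 hmin
      rw [hstep]
      have hc1 : lst.getD r 0 + 1 = ((kj + 1 : Nat) : Int) := by push_cast; omega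
      rw [hc1, ih (kj + 1)]

-- ===== VERDICT (by name: the statement is the Claim_ definition above) =====
theorem valid_subsequence_spec : Claim_equal_valid_subsequence := by
  intro tupla sequence _
  unfold Spec_valid_subsequence valid_subsequence valid_subsequence_alt
  have hb : loopB (buildPos tupla) sequence 0 = subseqRec tupla sequence := by
    simpa using loopB_eq tupla sequence 0
  rw [hb]
  simpa using validSubseqLoopA_eq tupla sequence 0 0 (Nat.zero_le _)
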